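-- pv_equiv track=rewrite | github.com/tezeladata/Group-zero-and-extra | codewars/extra_kata9.py | contamination
-- ===== SOURCE A (Python) =====
-- def contamination(text, char):
--     new=""
--     if text=="":
--         return ""
--     elif char=="":
--         return ""
--     else:
--         for i in range(len(text)):
--             new+=char
--     return new
-- ===== SOURCE B (Python) =====
-- def contamination(text, char):
--     return char * len(text)
-- ===== Notes on version B (the rewrite author's own statement) =====
-- stated objective: simpler
-- what changed: Replaces the loop that appends char len(text) times (plus explicit empty-string guards) with the single closed-form expression char * len(text).
import Mathlib
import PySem

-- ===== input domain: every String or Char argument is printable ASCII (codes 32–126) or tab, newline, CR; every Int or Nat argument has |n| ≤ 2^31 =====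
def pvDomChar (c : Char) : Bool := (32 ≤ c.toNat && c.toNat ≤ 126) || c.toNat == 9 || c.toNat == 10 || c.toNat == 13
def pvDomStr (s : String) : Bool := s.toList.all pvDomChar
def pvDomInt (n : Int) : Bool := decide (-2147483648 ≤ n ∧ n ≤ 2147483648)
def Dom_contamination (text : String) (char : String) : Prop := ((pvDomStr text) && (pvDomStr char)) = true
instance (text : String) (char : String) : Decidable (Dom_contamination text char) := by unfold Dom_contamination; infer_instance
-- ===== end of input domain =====

-- B replaces A's append-in-a-loop (with explicit empty-string guards) by the closed form char * len(text); return values proved equal on all inputs.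

-- ===== PORT A =====
-- literal transliteration: new=""; guards for text=="" and char==""; else loop over range(len(text)) appending char
def contamination (text : String) (char : String) : String :=
  let new := ""
  if text = "" then ""
  else if char = "" then ""
  else (PySem.List.pyRange 0 (PySem.Str.len text) 1).foldl (fun acc _ => acc ++ char) new

-- ===== PORT B =====
-- Python's `char * n` string repetition, ported as the obvious recursion on n
def strRepeat (char : String) : Nat → String
  | 0 => ""
  | n + 1 => char ++ strRepeat char n

def contamination_alt (text : String) (char : String) : String :=
  strRepeat char (PySem.Str.len text).toNat

-- ===== PRECONDITION & SPEC =====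
def Spec_contamination (text : String) (char : String) (out : String) : Prop := out = contamination_alt text char
instance (text : String) (char : String) (out : String) : Decidable (Spec_contamination text char out) := by unfold Spec_contamination; infer_instance

-- ===== CLAIM (what is proved, stated in full; the proofs are below) =====
def Claim_equal_contamination : Prop := ∀ (text : String) (char : String), Dom_contamination text char → Spec_contamination text char (contamination text char)

-- ===== LEMMAS AND PROOFS =====
theorem strRepeat_empty (n : Nat) : strRepeat "" n = "" := by
  induction n with
  | zero => rfl
  | succ n ih => simp [strRepeat, ih]

theorem foldl_append_repeat (char : String) (l : List Int) (acc : String) :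
    l.foldl (fun a _ => a ++ char) acc = acc ++ strRepeat char l.length := by
  induction l generalizing acc with
  | nil => simp [strRepeat]
  | cons x xs ih =>
      simp [List.foldl, ih, strRepeat]
      -- goal: acc ++ char ++ strRepeat char xs.length = acc ++ (char ++ strRepeat char xs.length)
      rw [String.append_assoc]

-- ===== VERDICT (by name: the statement is the Claim_ definition above) =====
theorem contamination_spec : Claim_equal_contamination := by
  intro text char _
  unfold Spec_contamination contamination contamination_alt
  by_cases ht : text = ""
  · subst ht; simp [PySem.Str.len, strRepeat]
  · by_cases hc : char = ""
    · simp [ht, hc, strRepeat_empty]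
    · simp [ht, hc, foldl_append_repeat]
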